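-- pv_equiv track=rewrite | github.com/ZHICHENGH/COMP30024 | makeaction.py | makeboomeva
-- ===== SOURCE A (Python) =====
-- def CoorIsValid(coor):
--     if (coor[0]>=0 and coor[0]<=7):
--         if (coor[1]>=0 and coor[1]<=7):
--             return True
--     return False
--
-- def getboomArea(coor):
--     x=coor[0]
--     y=coor[1]
--     result=[]
--     ls=[(x-1,y-1),(x-1,y),(x-1,y+1),(x,y-1),(x,y+1),(x+1,y-1),(x+1,y),(x+1,y+1)]
--     for i in ls:
--         if(CoorIsValid(i)):
--             result.append(i)
--     return result
--
-- def getBoomResult(boomArea,aimtokens):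
--     boomtoken=[i for i in aimtokens if i in boomArea]
--     if(len(boomtoken)!=0):
--         tmptokens=[i for i in aimtokens if i not in boomArea]
--         for i in boomtoken:
--             boomtoken=boomtoken+getBoomResult(getboomArea(i),tmptokens)
--         return boomtoken
--     else:
--         return []
--
-- def makeboomeva(coor,owntokens,opponenttokens):
--     alltokens=opponenttokens+owntokens
--     evavalue=0
--     boomArea=getboomArea(coor)
--     tmplist=getBoomResult(boomArea,alltokens)
--     tmplist.append(coor)
--     tmplist=list(set(tmplist))
--     for coor in tmplist:
--         evavalue+=(opponenttokens.count(coor)-owntokens.count(coor))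
--     return evavalue
-- ===== SOURCE B (Python) =====
-- from collections import Counter
--
--
-- def makeboomeva(coor, owntokens, opponenttokens):
--     own = Counter(owntokens)
--     opp = Counter(opponenttokens)
--     tokens = set(owntokens) | set(opponenttokens)
--
--     def neighbors(c):
--         x, y = c
--         return [(x + dx, y + dy)
--                 for dx in (-1, 0, 1) for dy in (-1, 0, 1)
--                 if (dx, dy) != (0, 0)
--                 and 0 <= x + dx <= 7 and 0 <= y + dy <= 7]
--
--     stack = [n for n in neighbors(coor) if n in tokens]
--     visited = set(stack)
--     while stack:
--         c = stack.pop()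
--         for n in neighbors(c):
--             if n in tokens and n not in visited:
--                 visited.add(n)
--                 stack.append(n)
--
--     cells = visited | {coor}
--     return sum(opp[c] - own[c] for c in cells)
-- ===== Notes on version B (the rewrite author's own statement) =====
-- stated objective: alternative
-- what changed: Replaces A's recursive chain-reaction expansion (which re-filters the remaining token list and re-searches it from every exploded token, duplicating work across branches) with Counters built once plus a single iterative stack-based flood fill over a visited set, then sums opponent-count minus own-count over the visited cells plus the origin.
import Mathlib
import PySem

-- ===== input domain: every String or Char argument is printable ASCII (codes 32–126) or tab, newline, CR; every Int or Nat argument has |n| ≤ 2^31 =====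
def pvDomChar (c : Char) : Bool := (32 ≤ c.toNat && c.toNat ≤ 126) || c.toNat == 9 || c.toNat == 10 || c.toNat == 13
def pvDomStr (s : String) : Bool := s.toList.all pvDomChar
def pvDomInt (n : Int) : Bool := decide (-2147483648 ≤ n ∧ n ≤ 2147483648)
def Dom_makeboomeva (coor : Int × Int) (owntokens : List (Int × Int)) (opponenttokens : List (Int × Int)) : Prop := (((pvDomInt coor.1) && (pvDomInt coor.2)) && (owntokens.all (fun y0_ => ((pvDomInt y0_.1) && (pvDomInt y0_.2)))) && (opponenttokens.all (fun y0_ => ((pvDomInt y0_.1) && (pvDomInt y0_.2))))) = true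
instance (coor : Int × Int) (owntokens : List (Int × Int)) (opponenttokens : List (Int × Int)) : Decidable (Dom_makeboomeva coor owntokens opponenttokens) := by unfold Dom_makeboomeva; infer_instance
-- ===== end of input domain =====

-- B replaces A's recursive chain-expansion (which redundantly re-searches the remaining
-- tokens from every exploded token) by a single iterative flood fill with a visited set.

-- ===== PORT A =====
def CoorIsValid (coor : Int × Int) : Bool :=
  if 0 ≤ coor.1 ∧ coor.1 ≤ 7 then
    if 0 ≤ coor.2 ∧ coor.2 ≤ 7 then true else false
  else false

def getboomArea (coor : Int × Int) : List (Int × Int) :=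
  let x := coor.1
  let y := coor.2
  let ls := [(x-1,y-1),(x-1,y),(x-1,y+1),(x,y-1),(x,y+1),(x+1,y-1),(x+1,y),(x+1,y+1)]
  ls.foldl (fun result i => if CoorIsValid i then result ++ [i] else result) []

-- termination helper for getBoomResult (cited by its decreasing_by)
theorem pvFilterNotLt {α : Type} (l : List α) (p : α → Bool)
    (h : (l.filter p).length ≠ 0) :
    (l.filter (fun a => !p a)).length < l.length := by
  rw [List.length_filter_lt_length_iff_exists]
  rcases List.exists_mem_of_length_pos (Nat.pos_of_ne_zero h) with ⟨x, hx⟩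
  rcases List.mem_filter.mp hx with ⟨hxl, hpx⟩
  exact ⟨x, hxl, by simp [hpx]⟩

def getBoomResult (boomArea : List (Int × Int)) (aimtokens : List (Int × Int)) : List (Int × Int) :=
  let boomtoken := aimtokens.filter (fun i => boomArea.contains i)
  if h : boomtoken.length ≠ 0 then
    let tmptokens := aimtokens.filter (fun i => !boomArea.contains i)
    boomtoken ++ boomtoken.flatMap (fun i => getBoomResult (getboomArea i) tmptokens)
  else []
termination_by aimtokens.length
decreasing_by
  simp only [List.length_unattach, ← List.countP_eq_length_filter]
  have hlt := pvFilterNotLt aimtokens (fun i => boomArea.contains i) (by simpa [boomtoken] using h)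
  simp only [← List.countP_eq_length_filter] at hlt
  exact lt_of_le_of_lt (le_of_eq (List.countP_attach (l := aimtokens) (p := fun a => !boomArea.contains a))) hlt

def makeboomeva (coor : Int × Int) (owntokens : List (Int × Int)) (opponenttokens : List (Int × Int)) : Int :=
  let alltokens := opponenttokens ++ owntokens
  let boomArea := getboomArea coor
  let tmplist := getBoomResult boomArea alltokens
  let tmplist := tmplist ++ [coor]
  let tmplist := PySem.Set.ofList tmplist
  tmplist.foldl (fun evavalue c =>
    evavalue + ((PySem.List.count opponenttokens c : Int) - (PySem.List.count owntokens c : Int))) 0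

-- ===== PORT B =====
def pvOnBoard (c : Int × Int) : Bool :=
  decide (0 ≤ c.1) && decide (c.1 ≤ 7) && decide (0 ≤ c.2) && decide (c.2 ≤ 7)

def pvNeighbors (c : Int × Int) : List (Int × Int) :=
  [(c.1-1,c.2-1),(c.1-1,c.2),(c.1-1,c.2+1),(c.1,c.2-1),(c.1,c.2+1),
   (c.1+1,c.2-1),(c.1+1,c.2),(c.1+1,c.2+1)].filter pvOnBoard

-- termination helper for pvFlood (cited by its decreasing_by)
theorem pvFilterStrongerLt {α : Type} (l : List α) (p q : α → Bool)
    (himp : ∀ a, q a = true → p a = true)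
    (x : α) (hxl : x ∈ l) (hpx : p x = true) (hqx : q x = false) :
    (l.filter q).length < (l.filter p).length := by
  have hq : l.filter q = (l.filter p).filter q := by
    rw [List.filter_filter]
    apply List.filter_congr
    intro a _
    cases hqa : q a with
    | true => simp [himp a hqa]
    | false => simp
  rw [hq, List.length_filter_lt_length_iff_exists]
  exact ⟨x, List.mem_filter.mpr ⟨hxl, hpx⟩, by simp [hqx]⟩

def pvFlood (tokens : PySem.Set (Int × Int)) (stack : List (Int × Int))
    (visited : PySem.Set (Int × Int)) : PySem.Set (Int × Int) :=
  match stack with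
  | [] => visited
  | c :: rest =>
    let news := (pvNeighbors c).filter (fun n => tokens.contains n && !visited.contains n)
    pvFlood tokens (news.reverse ++ rest) (visited.update news)
termination_by ((tokens.filter (fun t => !visited.contains t)).length, stack.length)
decreasing_by
  set nw := (pvNeighbors c).filter (fun n => tokens.contains n && !visited.contains n)
  by_cases hn : nw = []
  · rw [hn]
    simp only [PySem.Set.update, List.foldl_nil, List.reverse_nil, List.nil_append]
    exact Prod.Lex.right _ (by simp)
  · apply Prod.Lex.left
    obtain ⟨x, hx⟩ := List.exists_mem_of_length_pos (List.length_pos_of_ne_nil hn)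
    obtain ⟨-, hxc⟩ := List.mem_filter.mp hx
    obtain ⟨hxt, hxv⟩ := Bool.and_eq_true_iff.mp hxc
    have hxvm : x ∉ visited := by
      simpa [PySem.Set.contains, List.contains_iff_mem] using hxv
    refine pvFilterStrongerLt tokens _ _ ?_ x (List.contains_iff_mem.mp hxt) ?_ ?_
    · intro a ha
      simp only [Bool.not_eq_true'] at ha ⊢
      have hnm : a ∉ visited.update nw := by
        simpa [PySem.Set.contains, List.contains_iff_mem] using ha
      have : a ∉ visited := fun hav => hnm ((PySem.Set.mem_update _ _ _).mpr (Or.inl hav))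
      simpa [PySem.Set.contains, List.contains_iff_mem] using this
    · simpa [PySem.Set.contains, List.contains_iff_mem] using hxvm
    · have : x ∈ visited.update nw := (PySem.Set.mem_update _ _ _).mpr (Or.inr hx)
      simp [PySem.Set.contains, this]

def makeboomeva_alt (coor : Int × Int) (owntokens : List (Int × Int)) (opponenttokens : List (Int × Int)) : Int :=
  let own := PySem.Dict.counter owntokens
  let opp := PySem.Dict.counter opponenttokens
  let tokens := PySem.Set.union (PySem.Set.ofList owntokens) opponenttokens
  let stack := (pvNeighbors coor).filter (fun n => tokens.contains n)
  let visited := PySem.Set.ofList stack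
  let visited := pvFlood tokens stack visited
  let cells := PySem.Set.union visited [coor]
  cells.foldl (fun acc c => acc + (opp.getD c 0 - own.getD c 0)) 0

-- ===== PRECONDITION & SPEC =====
def Spec_makeboomeva (coor : Int × Int) (owntokens : List (Int × Int)) (opponenttokens : List (Int × Int)) (out : Int) : Prop := out = makeboomeva_alt coor owntokens opponenttokens
instance (coor : Int × Int) (owntokens : List (Int × Int)) (opponenttokens : List (Int × Int)) (out : Int) : Decidable (Spec_makeboomeva coor owntokens opponenttokens out) := by unfold Spec_makeboomeva; infer_instance

-- ===== CLAIM (what is proved, stated in full; the proofs are below) =====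
def Claim_equal_makeboomeva : Prop := ∀ (coor : Int × Int) (owntokens : List (Int × Int)) (opponenttokens : List (Int × Int)), Dom_makeboomeva coor owntokens opponenttokens → Spec_makeboomeva coor owntokens opponenttokens (makeboomeva coor owntokens opponenttokens)

-- ===== LEMMAS AND PROOFS =====

-- the chain-reaction reachability relation both programs compute
inductive pvReach (T : List (Int × Int)) (p : Int × Int) : (Int × Int) → Prop
  | base {q} (hq : q ∈ T) (hn : q ∈ pvNeighbors p) : pvReach T p q
  | step {r q} (hr : pvReach T p r) (hq : q ∈ T) (hn : q ∈ pvNeighbors r) : pvReach T p q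

theorem pvValid_eq (c : Int × Int) : CoorIsValid c = pvOnBoard c := by
  simp only [CoorIsValid, pvOnBoard]
  split_ifs with h1 h2 <;> simp_all

theorem pvArea_eq (c : Int × Int) : getboomArea c = pvNeighbors c := by
  simp only [getboomArea, pvNeighbors]
  rw [show (fun (result : List (Int × Int)) (i : Int × Int) =>
        if CoorIsValid i then result ++ [i] else result)
      = (fun result i => if CoorIsValid i then result ++ [id i] else result) from rfl]
  rw [PySem.List.foldl_append_if CoorIsValid id]
  simp only [List.map_id, List.nil_append]
  exact List.filter_congr (fun a _ => pvValid_eq a)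

theorem pvReach_mono {T T' : List (Int × Int)} {p q : Int × Int}
    (hsub : ∀ x, x ∈ T → x ∈ T') (h : pvReach T p q) : pvReach T' p q := by
  induction h with
  | base hq hn => exact .base (hsub _ hq) hn
  | step hr hq hn ih => exact .step ih (hsub _ hq) hn

theorem pvReach_trans {T : List (Int × Int)} {p i q : Int × Int}
    (hpi : pvReach T p i) (hiq : pvReach T i q) : pvReach T p q := by
  induction hiq with
  | base hq hn => exact .step hpi hq hn
  | step _ hq hn ih => exact .step ih hq hn

theorem pvPeel {T : List (Int × Int)} {p q : Int × Int} (h : pvReach T p q) :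
    (q ∈ T ∧ q ∈ pvNeighbors p) ∨
      ∃ i, (i ∈ T ∧ i ∈ pvNeighbors p) ∧
        pvReach (T.filter (fun x => !(pvNeighbors p).contains x)) i q := by
  induction h with
  | base hq hn => exact Or.inl ⟨hq, hn⟩
  | @step r q hr hq hn ih =>
    by_cases hqp : q ∈ pvNeighbors p
    · exact Or.inl ⟨hq, hqp⟩
    · have hqtmp : q ∈ T.filter (fun x => !(pvNeighbors p).contains x) :=
        List.mem_filter.mpr ⟨hq, by simp [hqp]⟩
      rcases ih with ⟨hrT, hrn⟩ | ⟨i, hi, hri⟩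
      · exact Or.inr ⟨r, ⟨hrT, hrn⟩, .base hqtmp hn⟩
      · exact Or.inr ⟨i, hi, .step hri hqtmp hn⟩

theorem pvAChar : ∀ (n : Nat) (T : List (Int × Int)) (p : Int × Int), T.length ≤ n →
    ∀ q, (q ∈ getBoomResult (getboomArea p) T ↔ pvReach T p q) := by
  intro n
  induction n with
  | zero =>
    intro T p hT q
    have hTn : T = [] := List.eq_nil_of_length_eq_zero (Nat.le_zero.mp hT)
    subst hTn
    rw [getBoomResult]
    rw [dif_neg (by simp)]
    constructor
    · intro hx; simp at hx
    · intro h; cases h with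
      | base hq _ => simp at hq
      | step _ hq _ => simp at hq
  | succ n ih =>
    intro T p hT q
    rw [getBoomResult]
    simp only [pvArea_eq]
    by_cases hb : (T.filter (fun i => (pvNeighbors p).contains i)).length ≠ 0
    · rw [dif_pos hb]
      have htmp : (T.filter (fun i => !(pvNeighbors p).contains i)).length ≤ n := by
        have h2 : (T.filter (fun i => !(pvNeighbors p).contains i)).length < T.length := by
          simpa using pvFilterNotLt T (fun i => (pvNeighbors p).contains i) hb
        omega
      constructor
      · intro hx
        rcases List.mem_append.mp hx with hx | hx
        · obtain ⟨hqT, hqn⟩ := List.mem_filter.mp hx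
          exact .base hqT (List.contains_iff_mem.mp hqn)
        · obtain ⟨i, hibt, hiq⟩ := List.mem_flatMap.mp hx
          obtain ⟨hiT, hin⟩ := List.mem_filter.mp hibt
          have hri : pvReach (T.filter (fun i => !(pvNeighbors p).contains i)) i q := by
            rw [show pvNeighbors i = getboomArea i from (pvArea_eq i).symm] at hiq
            exact (ih _ i htmp q).mp hiq
          have hriT : pvReach T i q :=
            pvReach_mono (fun x hx => (List.mem_filter.mp hx).1) hri
          exact pvReach_trans (.base hiT (List.contains_iff_mem.mp hin)) hriT
      · intro h
        rcases pvPeel h with ⟨hqT, hqn⟩ | ⟨i, ⟨hiT, hin⟩, hri⟩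
        · exact List.mem_append.mpr (Or.inl (List.mem_filter.mpr
            ⟨hqT, List.contains_iff_mem.mpr hqn⟩))
        · refine List.mem_append.mpr (Or.inr (List.mem_flatMap.mpr
            ⟨i, List.mem_filter.mpr ⟨hiT, List.contains_iff_mem.mpr hin⟩, ?_⟩))
          rw [show pvNeighbors i = getboomArea i from (pvArea_eq i).symm]
          exact (ih _ i htmp q).mpr hri
    · rw [dif_neg hb]
      have hempty : T.filter (fun i => (pvNeighbors p).contains i) = [] :=
        List.eq_nil_of_length_eq_zero (by omega)
      constructor
      · intro hx; simp at hx
      · intro h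
        exfalso
        rcases pvPeel h with ⟨hqT, hqn⟩ | ⟨i, ⟨hiT, hin⟩, _⟩
        · have : q ∈ T.filter (fun i => (pvNeighbors p).contains i) :=
            List.mem_filter.mpr ⟨hqT, List.contains_iff_mem.mpr hqn⟩
          rw [hempty] at this
          simp at this
        · have : i ∈ T.filter (fun i => (pvNeighbors p).contains i) :=
            List.mem_filter.mpr ⟨hiT, List.contains_iff_mem.mpr hin⟩
          rw [hempty] at this
          simp at this

theorem pvFlood_mem_mono (tokens : PySem.Set (Int × Int)) (stack : List (Int × Int))
    (visited : PySem.Set (Int × Int)) :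
    ∀ x ∈ visited, x ∈ pvFlood tokens stack visited := by
  fun_induction pvFlood with
  | case1 visited => exact fun x hx => hx
  | case2 visited c rest news ih =>
    exact fun x hx => ih x ((PySem.Set.mem_update _ _ _).mpr (Or.inl hx))

theorem pvFlood_sound (G : (Int × Int) → Prop) :
    ∀ (tokens : PySem.Set (Int × Int)) (stack : List (Int × Int))
      (visited : PySem.Set (Int × Int)),
      (∀ c n, G c → n ∈ tokens → n ∈ pvNeighbors c → G n) →
      (∀ c ∈ stack, G c) → (∀ v ∈ visited, G v) →
      ∀ q ∈ pvFlood tokens stack visited, G q := by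
  intro tokens stack visited
  fun_induction pvFlood tokens stack visited with
  | case1 visited => exact fun _ _ hv q hq => hv q hq
  | case2 visited c rest news ih =>
    intro hstep hs hv
    have hnews : ∀ x ∈ news, G x := by
      intro x hx
      obtain ⟨hxn, hxc⟩ := List.mem_filter.mp hx
      obtain ⟨hxt, _⟩ := Bool.and_eq_true_iff.mp hxc
      exact hstep c x (hs c (List.mem_cons_self))
        (by simpa [PySem.Set.contains, List.contains_iff_mem] using hxt) hxn
    apply ih hstep
    · intro c' hc'
      rcases List.mem_append.mp hc' with h | h
      · exact hnews c' (List.mem_reverse.mp h)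
      · exact hs c' (List.mem_cons_of_mem _ h)
    · intro v hv'
      rcases (PySem.Set.mem_update _ _ _).mp hv' with h | h
      · exact hv v h
      · exact hnews v h

theorem pvFlood_closed :
    ∀ (tokens : PySem.Set (Int × Int)) (stack : List (Int × Int))
      (visited : PySem.Set (Int × Int)),
      (∀ c ∈ stack, c ∈ visited) →
      (∀ v ∈ visited, v ∉ stack → ∀ n, n ∈ pvNeighbors v → n ∈ tokens → n ∈ visited) →
      ∀ v ∈ pvFlood tokens stack visited, ∀ n, n ∈ pvNeighbors v → n ∈ tokens →
        n ∈ pvFlood tokens stack visited := by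
  intro tokens stack visited
  fun_induction pvFlood tokens stack visited with
  | case1 visited => exact fun _ hcl v hv n hn ht => hcl v hv (by simp) n hn ht
  | case2 visited c rest news ih =>
    intro hsv hcl
    apply ih
    · intro c' hc'
      apply (PySem.Set.mem_update _ _ _).mpr
      rcases List.mem_append.mp hc' with h | h
      · exact Or.inr (List.mem_reverse.mp h)
      · exact Or.inl (hsv c' (List.mem_cons_of_mem _ h))
    · intro v hv hvs n hn ht
      apply (PySem.Set.mem_update _ _ _).mpr
      rcases (PySem.Set.mem_update _ _ _).mp hv with hvv | hvnews
      · by_cases hvc : v = c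
        · subst hvc
          by_cases hnv : n ∈ visited
          · exact Or.inl hnv
          · refine Or.inr (List.mem_filter.mpr ⟨hn, ?_⟩)
            simp [PySem.Set.contains, ht, hnv]
        · have hvst : v ∉ c :: rest := by
            intro hmem
            rcases List.mem_cons.mp hmem with h | h
            · exact hvc h
            · exact hvs (List.mem_append.mpr (Or.inr h))
          exact Or.inl (hcl v hvv hvst n hn ht)
      · exact absurd (List.mem_append.mpr (Or.inl (List.mem_reverse.mpr hvnews))) hvs

theorem pvFlood_nodup :
    ∀ (tokens : PySem.Set (Int × Int)) (stack : List (Int × Int))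
      (visited : PySem.Set (Int × Int)), visited.Nodup →
      (pvFlood tokens stack visited).Nodup := by
  intro tokens stack visited
  fun_induction pvFlood tokens stack visited with
  | case1 visited => exact fun h => h
  | case2 visited c rest news ih =>
    exact fun h => ih (PySem.Set.nodup_update _ _ h)

theorem pvFlood_char (p : Int × Int) (T : List (Int × Int)) (q : Int × Int) :
    q ∈ pvFlood T ((pvNeighbors p).filter (fun n => PySem.Set.contains T n))
      (PySem.Set.ofList ((pvNeighbors p).filter (fun n => PySem.Set.contains T n)))
      ↔ pvReach T p q := by
  have hfront : ∀ c ∈ (pvNeighbors p).filter (fun n => PySem.Set.contains T n),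
      pvReach T p c := by
    intro c hc
    obtain ⟨hcn, hct⟩ := List.mem_filter.mp hc
    exact .base (by simpa [PySem.Set.contains, List.contains_iff_mem] using hct) hcn
  constructor
  · intro hq
    refine pvFlood_sound (pvReach T p) T _ _
      (fun c n hc hnt hnn => .step hc hnt hnn) hfront ?_ q hq
    intro v hv
    exact hfront v ((PySem.Set.mem_ofList _ _).mp hv)
  · intro h
    induction h with
    | base hq hn =>
      apply pvFlood_mem_mono
      rw [PySem.Set.mem_ofList]
      exact List.mem_filter.mpr ⟨hn, by simp [PySem.Set.contains, hq]⟩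
    | @step r q' hr hq hn ih =>
      exact pvFlood_closed T _ _
        (fun c hc => (PySem.Set.mem_ofList _ _).mpr hc)
        (fun v hv hvs => absurd ((PySem.Set.mem_ofList _ _).mp hv) hvs)
        r ih q' hn hq

-- ===== VERDICT (by name: the statement is the Claim_ definition above) =====
theorem makeboomeva_spec : Claim_equal_makeboomeva := by
  intro coor own opp _
  show makeboomeva coor own opp = makeboomeva_alt coor own opp
  unfold makeboomeva makeboomeva_alt
  simp only [PySem.List.foldl_add, zero_add, PySem.Dict.getD_counter, PySem.List.count_eq]
  apply List.Perm.sum_eq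
  apply List.Perm.map
  have hNU : ∀ (s : PySem.Set (Int × Int)) (t : List (Int × Int)),
      s.Nodup → (s.union t).Nodup := fun s t h => PySem.Set.nodup_update s t h
  rw [List.perm_ext_iff_of_nodup (PySem.Set.nodup_ofList _)
      (hNU _ _ (pvFlood_nodup _ _ _ (PySem.Set.nodup_ofList _)))]
  intro a
  have hTmem : ∀ x : Int × Int,
      x ∈ PySem.Set.union (PySem.Set.ofList own) opp ↔ x ∈ opp ++ own := by
    intro x
    rw [PySem.Set.mem_union, PySem.Set.mem_ofList, List.mem_append]
    tauto
  rw [PySem.Set.mem_ofList, PySem.Set.mem_union, List.mem_append]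
  rw [pvAChar (opp ++ own).length (opp ++ own) coor (le_refl _) a]
  rw [pvFlood_char coor _ a]
  simp only [List.mem_singleton]
  constructor
  · rintro (h | h)
    · exact Or.inl (pvReach_mono (fun x hx => (hTmem x).mpr hx) h)
    · exact Or.inr h
  · rintro (h | h)
    · exact Or.inl (pvReach_mono (fun x hx => (hTmem x).mp hx) h)
    · exact Or.inr h
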